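-- pv_equiv track=rewrite | github.com/LaoHTui/QPA-Cycler | File_operations/get_csv_data.py | remove_largest_n_heap_mask
-- ===== SOURCE A (Python) =====
-- import heapq
--
-- def remove_largest_n_heap_mask(numbers, n):
--     """使用堆方法，返回一个布尔掩码指示哪些元素应该被保留"""
--     if n <= 0:
--         return [True] * len(numbers)  # 所有元素都保留
--
--     # 找到最大的n个数字
--     largest_n = heapq.nlargest(n, numbers)
--
--     # 统计最大n个数字的出现次数
--     count_dict = {}
--     for num in largest_n:
--         count_dict[num] = count_dict.get(num, 0) + 1
--
--     # 创建掩码列表，初始化为True（保留所有元素）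
--     mask = [True] * len(numbers)
--
--     # 遍历列表，标记要移除的元素为False
--     for i, num in enumerate(numbers):
--         if num in count_dict and count_dict[num] > 0:
--             mask[i] = False  # 标记为要移除
--             count_dict[num] -= 1
--
--     return mask
-- ===== SOURCE B (Python) =====
-- def remove_largest_n_heap_mask(numbers, n):
--     """Threshold method: nth-largest value + tie budget; no heap, no dict."""
--     if n <= 0:
--         return [True] * len(numbers)
--     if n >= len(numbers):
--         return [False] * len(numbers)
--     desc = sorted(numbers, reverse=True)
--     t = desc[n - 1]
--     ties = n - sum(1 for x in numbers if x > t)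
--     mask = []
--     for x in numbers:
--         if x > t:
--             mask.append(False)
--         elif x == t and ties > 0:
--             mask.append(False)
--             ties -= 1
--         else:
--             mask.append(True)
--     return mask
-- ===== Notes on version B (the rewrite author's own statement) =====
-- stated objective: faster
-- what changed: Replaces the heap-of-n-largest plus occurrence-count dictionary with a threshold method: take the nth-largest value from a descending sort, mark everything above it and a computed budget of leftmost ties as removed, so no dictionary is built or mutated per element.
import Mathlib
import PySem

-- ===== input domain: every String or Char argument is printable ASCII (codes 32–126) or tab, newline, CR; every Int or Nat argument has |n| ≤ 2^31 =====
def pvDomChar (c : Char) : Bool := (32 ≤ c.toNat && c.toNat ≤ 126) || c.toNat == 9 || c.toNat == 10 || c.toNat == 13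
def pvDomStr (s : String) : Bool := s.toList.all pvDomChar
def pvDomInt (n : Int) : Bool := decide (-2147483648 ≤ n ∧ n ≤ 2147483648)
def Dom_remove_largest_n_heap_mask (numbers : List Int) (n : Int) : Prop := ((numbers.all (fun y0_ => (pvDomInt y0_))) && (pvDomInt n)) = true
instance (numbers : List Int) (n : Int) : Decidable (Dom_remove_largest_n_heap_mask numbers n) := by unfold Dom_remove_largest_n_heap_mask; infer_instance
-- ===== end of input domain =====

-- B replaces A's heap-of-n-largest + occurrence-count dictionary by a threshold method
-- (nth-largest value from a descending sort; mark everything above it plus a budget of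
-- leftmost ties): no per-element dictionary work, measured faster in a timing run.

-- ===== PORT A =====
-- loop body of "for i, num in enumerate(numbers): if num in count_dict and count_dict[num] > 0: …"
def maskStepA (st : List Bool × PySem.Dict Int Int) (p : Int × Int) : List Bool × PySem.Dict Int Int :=
  if st.2.contains p.2 = true ∧ 0 < st.2.getD p.2 0 then
    (PySem.List.pySetD st.1 p.1 false, st.2.insert p.2 (st.2.getD p.2 0 - 1))
  else st

def remove_largest_n_heap_mask (numbers : List Int) (n : Int) : List Bool :=
  if n ≤ 0 then List.replicate numbers.length true
  else
    -- heapq.nlargest(n, numbers) = sorted(numbers, reverse=True)[:n]  (documented equivalence)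
    let largest_n := (PySem.List.sorted numbers (fun x => x) true).take n.toNat
    let count_dict := largest_n.foldl (fun d num => d.insert num (d.getD num 0 + 1)) PySem.Dict.empty
    let mask := List.replicate numbers.length true
    ((PySem.List.enumerate numbers 0).foldl maskStepA (mask, count_dict)).1

-- ===== PORT B =====
-- loop body of B's "for x in numbers: …  mask.append(…)" with the tie budget in st.2
def maskStepB (t : Int) (st : List Bool × Int) (x : Int) : List Bool × Int :=
  if t < x then (st.1 ++ [false], st.2)
  else if x = t ∧ 0 < st.2 then (st.1 ++ [false], st.2 - 1)
  else (st.1 ++ [true], st.2)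

def remove_largest_n_heap_mask_alt (numbers : List Int) (n : Int) : List Bool :=
  if n ≤ 0 then List.replicate numbers.length true
  else if n ≥ (numbers.length : Int) then List.replicate numbers.length false
  else
    let desc := PySem.List.sorted numbers (fun x => x) true
    let t := PySem.List.pyGetD desc (n - 1) 0
    let ties : Int := n - (numbers.countP (fun x => decide (t < x)) : Int)
    (numbers.foldl (maskStepB t) ([], ties)).1

-- ===== PRECONDITION & SPEC =====
def Spec_remove_largest_n_heap_mask (numbers : List Int) (n : Int) (out : List Bool) : Prop := out = remove_largest_n_heap_mask_alt numbers n
instance (numbers : List Int) (n : Int) (out : List Bool) : Decidable (Spec_remove_largest_n_heap_mask numbers n out) := by unfold Spec_remove_largest_n_heap_mask; infer_instance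

-- ===== CLAIM (what is proved, stated in full; the proofs are below) =====
def Claim_equal_remove_largest_n_heap_mask : Prop := ∀ (numbers : List Int) (n : Int), Dom_remove_largest_n_heap_mask numbers n → Spec_remove_largest_n_heap_mask numbers n (remove_largest_n_heap_mask numbers n)

-- ===== LEMMAS AND PROOFS =====

-- head-recursive form of A's marking loop
def scanA (d : PySem.Dict Int Int) : List Int → List Bool
  | [] => []
  | x :: xs =>
    if d.contains x = true ∧ 0 < d.getD x 0
    then false :: scanA (d.insert x (d.getD x 0 - 1)) xs
    else true :: scanA d xs

-- head-recursive form of B's marking loop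
def scanB (t r : Int) : List Int → List Bool
  | [] => []
  | x :: xs =>
    if t < x then false :: scanB t r xs
    else if x = t ∧ 0 < r then false :: scanB t (r - 1) xs
    else true :: scanB t r xs

theorem contains_of_getD_pos (d : PySem.Dict Int Int) (x : Int) (h : 0 < d.getD x 0) :
    d.contains x = true := by
  by_contra hc
  rw [PySem.Dict.getD_of_not_contains d (0 : Int) (by simpa using hc)] at h
  omega

theorem foldA_eq_scanA (xs : List Int) (d : PySem.Dict Int Int) (pre : List Bool) :
    ((PySem.List.enumerate xs (pre.length : Int)).foldl maskStepA
      (pre ++ List.replicate xs.length true, d)).1 = pre ++ scanA d xs := by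
  induction xs generalizing d pre with
  | nil => simp [scanA, PySem.List.enumerate_nil]
  | cons x xs ih =>
    rw [PySem.List.enumerate_cons, List.foldl_cons]
    rw [scanA]
    by_cases hc : d.contains x = true ∧ 0 < d.getD x 0
    · have hstep : maskStepA (pre ++ List.replicate (x :: xs).length true, d) ((pre.length : Int), x)
          = ((pre ++ [false]) ++ List.replicate xs.length true, d.insert x (d.getD x 0 - 1)) := by
        simp only [maskStepA, hc, List.length_cons, List.replicate_succ]
        rw [PySem.List.pySetD_natCast]
        rw [List.set_append]
        simp
      rw [hstep]
      have := ih (d.insert x (d.getD x 0 - 1)) (pre ++ [false])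
      simp only [List.length_append, List.length_cons, List.length_nil, Nat.cast_add,
        Nat.cast_one, zero_add] at this ⊢
      rw [this]
      simp [hc]
    · have hstep : maskStepA (pre ++ List.replicate (x :: xs).length true, d) ((pre.length : Int), x)
          = ((pre ++ [true]) ++ List.replicate xs.length true, d) := by
        simp [maskStepA, hc, List.replicate_succ]
      rw [hstep]
      have := ih d (pre ++ [true])
      simp only [List.length_append, List.length_cons, List.length_nil, Nat.cast_add,
        Nat.cast_one, zero_add] at this ⊢
      rw [this]
      simp [hc]

theorem foldB_eq_scanB (xs : List Int) (t r : Int) (acc : List Bool) :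
    (xs.foldl (maskStepB t) (acc, r)).1 = acc ++ scanB t r xs := by
  induction xs generalizing r acc with
  | nil => simp [scanB]
  | cons x xs ih =>
    simp only [List.foldl_cons, maskStepB, scanB]
    by_cases hlt : t < x
    · simp [hlt, ih]
    · by_cases htie : x = t ∧ 0 < r
      · simp [htie, ih]
      · simp [hlt, htie, ih]

theorem scanA_all_false (xs : List Int) (d : PySem.Dict Int Int)
    (h : ∀ x, d.getD x 0 = (xs.count x : Int)) :
    scanA d xs = List.replicate xs.length false := by
  induction xs generalizing d with
  | nil => simp [scanA]
  | cons x xs ih =>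
    have hx : d.getD x 0 = ((x :: xs).count x : Int) := h x
    have hpos : 0 < d.getD x 0 := by
      rw [hx]; simp [List.count_cons_self]
    rw [scanA, if_pos ⟨contains_of_getD_pos d x hpos, hpos⟩]
    rw [List.length_cons, List.replicate_succ]
    congr 1
    apply ih
    intro y
    by_cases hy : y = x
    · subst hy
      rw [PySem.Dict.getD_insert_self, hx]
      simp [List.count_cons_self]
    · rw [PySem.Dict.getD_insert_of_ne _ _ _ hy, h y]
      have hxy : ¬ x = y := fun he => hy he.symm
      simp [hxy]

theorem scanA_eq_scanB (xs : List Int) (d : PySem.Dict Int Int) (t r : Int)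
    (h1 : ∀ x, t < x → d.getD x 0 = (xs.count x : Int))
    (h2 : d.getD t 0 = r)
    (h3 : ∀ x, x < t → d.getD x 0 ≤ 0) :
    scanA d xs = scanB t r xs := by
  induction xs generalizing d r with
  | nil => simp [scanA, scanB]
  | cons x xs ih =>
    rw [scanA, scanB]
    rcases lt_trichotomy t x with hlt | heq | hgt
    · -- t < x : both mark False; the count of x drops by one
      have hcnt : d.getD x 0 = ((x :: xs).count x : Int) := h1 x hlt
      have hpos : 0 < d.getD x 0 := by rw [hcnt]; simp [List.count_cons_self]
      rw [if_pos ⟨contains_of_getD_pos d x hpos, hpos⟩, if_pos hlt]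
      congr 1
      apply ih
      · intro y hy
        by_cases hyx : y = x
        · subst hyx; rw [PySem.Dict.getD_insert_self, hcnt]; simp [List.count_cons_self]
        · rw [PySem.Dict.getD_insert_of_ne _ _ _ hyx, h1 y hy]
          have : ¬ x = y := fun he => hyx he.symm
          simp [this]
      · rw [PySem.Dict.getD_insert_of_ne _ _ _ (by omega), h2]
      · intro y hy
        rw [PySem.Dict.getD_insert_of_ne _ _ _ (by omega)]
        exact h3 y hy
    · -- x = t : both gate on the same counter value
      subst heq
      rw [if_neg (lt_irrefl t)]
      by_cases hr : 0 < r
      · have hpos : 0 < d.getD t 0 := by rw [h2]; exact hr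
        rw [if_pos ⟨contains_of_getD_pos d t hpos, hpos⟩, if_pos ⟨rfl, hr⟩]
        congr 1
        apply ih
        · intro y hy
          rw [PySem.Dict.getD_insert_of_ne _ _ _ (by omega), h1 y hy]
          have : ¬ t = y := by omega
          simp [this]
        · rw [PySem.Dict.getD_insert_self, h2]
        · intro y hy
          rw [PySem.Dict.getD_insert_of_ne _ _ _ (by omega)]
          exact h3 y hy
      · have : ¬ (d.contains t = true ∧ 0 < d.getD t 0) := by
          rintro ⟨-, hp⟩; rw [h2] at hp; exact hr hp
        rw [if_neg this, if_neg (by rintro ⟨-, hp⟩; exact hr hp)]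
        congr 1
        apply ih
        · intro y hy
          rw [h1 y hy]
          have : ¬ t = y := by omega
          simp [this]
        · exact h2
        · exact h3
    · -- x < t : both keep the element
      have hnp : ¬ (d.contains x = true ∧ 0 < d.getD x 0) := by
        rintro ⟨-, hp⟩; have := h3 x hgt; omega
      rw [if_neg hnp, if_neg (by omega), if_neg (by rintro ⟨he, -⟩; omega)]
      congr 1
      apply ih
      · intro y hy
        rw [h1 y hy]
        have : ¬ x = y := by omega
        simp [this]
      · exact h2
      · exact h3

-- ===== VERDICT (by name: the statement is the Claim_ definition above) =====
theorem remove_largest_n_heap_mask_spec : Claim_equal_remove_largest_n_heap_mask := by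
  intro numbers n _
  unfold Spec_remove_largest_n_heap_mask
  simp only [remove_largest_n_heap_mask, remove_largest_n_heap_mask_alt]
  by_cases hn : n ≤ 0
  · simp [hn]
  rw [if_neg hn, if_neg hn]
  have hA0 : ∀ d : PySem.Dict Int Int,
      ((PySem.List.enumerate numbers 0).foldl maskStepA (List.replicate numbers.length true, d)).1
      = scanA d numbers := by
    intro d
    simpa using foldA_eq_scanA numbers d []
  rw [PySem.Dict.foldl_insert_getD_add_one_eq_counter, hA0]
  have hperm : (PySem.List.sorted numbers (fun x => x) true).Perm numbers :=
    PySem.List.sorted_perm numbers (fun x => x) true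
  have hlen : (PySem.List.sorted numbers (fun x => x) true).length = numbers.length :=
    PySem.List.length_sorted numbers (fun x => x) true
  by_cases hge : n ≥ (numbers.length : Int)
  · -- n ≥ len(numbers): every element is among the n largest, B returns all-False directly
    rw [if_pos hge]
    have htake : (PySem.List.sorted numbers (fun x => x) true).take n.toNat
        = PySem.List.sorted numbers (fun x => x) true :=
      List.take_of_length_le (by omega)
    rw [htake, scanA_all_false]
    intro x
    rw [PySem.Dict.getD_counter]
    exact_mod_cast hperm.count_eq x
  rw [if_neg hge]
  rw [foldB_eq_scanB numbers _ _ [], List.nil_append]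
  -- abbreviations for the main case
  set desc := PySem.List.sorted numbers (fun x => x) true with hdesc
  set k := n.toNat with hk
  have hk1 : 1 ≤ k := by omega
  have hk2 : k < numbers.length := by omega
  have hkd : k - 1 < desc.length := by omega
  set t := PySem.List.pyGetD desc (n - 1) 0 with htdef
  have ht : t = desc[k - 1] := by
    rw [htdef, PySem.List.pyGetD_eq_getElem desc 0 (by omega) (by rw [hlen]; omega)]
    congr 1
    omega
  have hmono : ∀ (i j : Nat) (hi : i < desc.length) (hj : j < desc.length),
      i ≤ j → desc[j] ≤ desc[i] := by
    intro i j hi hj hij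
    rcases eq_or_lt_of_le hij with h | h
    · subst h; exact le_refl _
    · exact List.pairwise_iff_getElem.mp
        (PySem.List.sorted_pairwise_rev numbers (fun x => x)) i j hi hj h
  have hdrop_le : ∀ y ∈ desc.drop k, y ≤ t := by
    intro y hy
    obtain ⟨i, hi, hyi⟩ := List.mem_iff_getElem.mp hy
    rw [List.getElem_drop] at hyi
    have hi' : k + i < desc.length := by simp [List.length_drop] at hi; omega
    rw [← hyi, ht]
    exact hmono (k - 1) (k + i) hkd hi' (by omega)
  have htake_ge : ∀ y ∈ desc.take k, t ≤ y := by
    intro y hy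
    obtain ⟨i, hi, hyi⟩ := List.mem_iff_getElem.mp hy
    rw [List.getElem_take] at hyi
    rw [← hyi, ht]
    exact hmono i (k - 1) (by simp at hi; omega) hkd
      (by simp [List.length_take] at hi; omega)
  have hsplitP : numbers.countP (fun x => decide (t < x))
      = (desc.take k).countP (fun x => decide (t < x)) := by
    rw [← hperm.countP_eq (fun x => decide (t < x))]
    conv_lhs => rw [← List.take_append_drop k desc]
    rw [List.countP_append]
    have : (desc.drop k).countP (fun x => decide (t < x)) = 0 := by
      rw [List.countP_eq_zero]
      intro y hy
      simpa using not_lt_of_ge (hdrop_le y hy)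
    omega
  have hTlen : (desc.take k).length = k := by
    rw [List.length_take]; omega
  apply scanA_eq_scanB
  · -- values above the threshold: all their occurrences are among the n largest
    intro x hx
    rw [PySem.Dict.getD_counter]
    have hzero : (desc.drop k).count x = 0 := by
      rw [List.count_eq_zero]
      intro hmem
      exact absurd hx (not_lt_of_ge (hdrop_le x hmem))
    have : desc.count x = (desc.take k).count x + (desc.drop k).count x := by
      conv_lhs => rw [← List.take_append_drop k desc]
      exact List.count_append ..
    have hcx : (desc.take k).count x = numbers.count x := by
      have := hperm.count_eq x
      omega
    exact_mod_cast hcx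
  · -- the threshold value itself: k minus the number of strictly larger elements
    rw [PySem.Dict.getD_counter]
    have hcnt : (desc.take k).count t
        = k - (desc.take k).countP (fun x => decide (t < x)) := by
      have hsum := List.length_eq_countP_add_countP (fun x => decide (t < x))
        (l := desc.take k)
      have hcc : (desc.take k).countP (fun a => decide ¬(decide (t < a) = true))
          = (desc.take k).count t := by
        rw [List.count]
        apply List.countP_congr
        intro y hy
        have hge' := htake_ge y hy
        by_cases hyt : y = t
        · simp [hyt]
        · have : t < y := lt_of_le_of_ne hge' (fun he => hyt he.symm)
          simp [this]
          omega
      omega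
    have hle : (desc.take k).countP (fun x => decide (t < x)) ≤ k := by
      have := List.countP_le_length (p := fun x => decide (t < x)) (l := desc.take k)
      omega
    rw [hcnt, hsplitP]
    push_cast [Nat.cast_sub hle]
    omega
  · -- values below the threshold never occur among the n largest
    intro x hx
    rw [PySem.Dict.getD_counter]
    have : (desc.take k).count x = 0 := by
      rw [List.count_eq_zero]
      intro hmem
      exact absurd (htake_ge x hmem) (not_le_of_gt hx)
    simp [this]
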